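-- pv_equiv track=rewrite | github.com/radhika2722/TAMU_datathon | final_submission.py | straight_line_path
-- ===== SOURCE A (Python) =====
-- def straight_line_path(start, length):
--     path = [start]
--     for i in range(length):
--         if i%2 == 0:
--             path.append((path[-1][0]+1, path[-1][1]))
--         else:
--             path.append((path[-1][0], path[-1][1]+1))
--     return path
-- ===== SOURCE B (Python) =====
-- def straight_line_path(start, length):
--     # Closed form: point j is (start[0] + (j+1)//2, start[1] + j//2); no dependence on the previous point.
--     return [start] + [(start[0] + (j + 1) // 2, start[1] + j // 2)
--                       for j in range(1, length + 1)]
-- ===== Notes on version B (the rewrite author's own statement) =====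
-- stated objective: simpler
-- what changed: Replaces the sequential loop that extends the path from its last element with a direct closed-form comprehension computing point j as (start[0]+(j+1)//2, start[1]+j//2), removing the data dependence on path[-1].
import Mathlib
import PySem

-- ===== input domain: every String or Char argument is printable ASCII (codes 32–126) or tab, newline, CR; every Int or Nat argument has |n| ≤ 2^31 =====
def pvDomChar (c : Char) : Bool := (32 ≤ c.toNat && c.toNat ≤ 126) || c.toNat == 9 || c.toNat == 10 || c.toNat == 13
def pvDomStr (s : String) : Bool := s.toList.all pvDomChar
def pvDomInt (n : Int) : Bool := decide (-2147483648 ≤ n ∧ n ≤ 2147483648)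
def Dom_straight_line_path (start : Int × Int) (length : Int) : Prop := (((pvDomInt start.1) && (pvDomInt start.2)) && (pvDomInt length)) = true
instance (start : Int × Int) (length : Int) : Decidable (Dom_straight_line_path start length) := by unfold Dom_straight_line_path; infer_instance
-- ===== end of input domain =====

-- B replaces A's loop over path[-1] with a closed-form comprehension over the index (objective: simpler).

-- ===== PORT A =====
-- path[-1] is read via pyGet? (-1); the list always ends with the previous point, so getD's default is never used.
def straight_line_path (start : Int × Int) (length : Int) : List (Int × Int) :=
  (PySem.List.pyRange 0 length 1).foldl
    (fun path i =>
      let last := (PySem.List.pyGet? path (-1)).getD (0, 0)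
      if PySem.Int.mod i 2 = 0 then path ++ [(last.1 + 1, last.2)]
      else path ++ [(last.1, last.2 + 1)])
    [start]

-- ===== PORT B =====
def straight_line_path_alt (start : Int × Int) (length : Int) : List (Int × Int) :=
  start :: (PySem.List.pyRange 1 (length + 1) 1).map
    (fun j => (start.1 + PySem.Int.floordiv (j + 1) 2, start.2 + PySem.Int.floordiv j 2))

-- ===== PRECONDITION & SPEC =====
def Spec_straight_line_path (start : Int × Int) (length : Int) (out : List (Int × Int)) : Prop := out = straight_line_path_alt start length
instance (start : Int × Int) (length : Int) (out : List (Int × Int)) : Decidable (Spec_straight_line_path start length out) := by unfold Spec_straight_line_path; infer_instance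

-- ===== CLAIM (what is proved, stated in full; the proofs are below) =====
def Claim_equal_straight_line_path : Prop := ∀ (start : Int × Int) (length : Int), Dom_straight_line_path start length → Spec_straight_line_path start length (straight_line_path start length)

-- ===== LEMMAS AND PROOFS =====

theorem slp_key (start : Int × Int) (n : Nat) :
    straight_line_path start (n : Int) = straight_line_path_alt start (n : Int) := by
  induction n with
  | zero =>
      simp [straight_line_path, straight_line_path_alt, PySem.List.pyRange_one_eq_nil]
  | succ n ih =>
      have hcast : ((n + 1 : Nat) : Int) = (n : Int) + 1 := by push_cast; ring
      set f : Int → Int × Int :=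
        fun j => (start.1 + PySem.Int.floordiv (j + 1) 2, start.2 + PySem.Int.floordiv j 2)
        with hf
      have hf0 : f 0 = start := by
        have h1 : PySem.Int.floordiv 1 2 = 0 := by decide
        have h2 : PySem.Int.floordiv 0 2 = 0 := by decide
        norm_num [hf, h1, h2]
      have hcons : ∀ m : Int, 0 < m →
          start :: (PySem.List.pyRange 1 m 1).map f = (PySem.List.pyRange 0 m 1).map f := by
        intro m hm
        rw [PySem.List.pyRange_one_cons (by omega : (0:Int) < m)]
        simp [hf0]
      have hsplit : PySem.List.pyRange 0 ((n : Int) + 1) 1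
          = PySem.List.pyRange 0 (n : Int) 1 ++ [(n : Int)] :=
        PySem.List.pyRange_one_succ_right (by omega)
      rw [straight_line_path, hcast, hsplit, List.foldl_append]
      rw [straight_line_path] at ih
      rw [ih, straight_line_path_alt, straight_line_path_alt]
      rw [← hf]
      rw [hcons ((n : Int) + 1) (by omega), hcons ((n : Int) + 1 + 1) (by omega)]
      rw [PySem.List.pyRange_one_succ_right (by omega : (0:Int) ≤ (n : Int) + 1),
          List.map_append]
      -- one loop step on M = map f (range 0 (n+1)); its last element is f n
      rw [PySem.List.pyRange_one_succ_right (by omega : (0:Int) ≤ (n : Int)), List.map_append]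
      simp only [List.foldl_cons, List.foldl_nil, List.map_cons, List.map_nil]
      rw [PySem.List.pyGet?_neg_one_append_singleton]
      have hgoal : (if PySem.Int.mod (n : Int) 2 = 0
            then ((f (n : Int)).1 + 1, (f (n : Int)).2)
            else ((f (n : Int)).1, (f (n : Int)).2 + 1)) = f ((n : Int) + 1) := by
        have e1 := PySem.Int.floordiv_eq_ediv_of_pos (a := (n : Int) + 1) (by omega : (0:Int) < 2)
        have e2 := PySem.Int.floordiv_eq_ediv_of_pos (a := (n : Int)) (by omega : (0:Int) < 2)
        have e3 := PySem.Int.floordiv_eq_ediv_of_pos (a := (n : Int) + 1 + 1) (by omega : (0:Int) < 2)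
        have hm := PySem.Int.mod_eq_emod_of_pos (a := (n : Int)) (by omega : (0:Int) < 2)
        simp only [hf, hm, e1, e2, e3]
        split_ifs with h
        · exact Prod.ext (by dsimp; omega) (by dsimp; omega)
        · exact Prod.ext (by dsimp; omega) (by dsimp; omega)
      simp only [Option.getD_some]
      split_ifs with h
      · rw [← hgoal, if_pos h]
      · rw [← hgoal, if_neg h]

theorem straight_line_path_spec : Claim_equal_straight_line_path := by
  intro start length _
  show straight_line_path start length = straight_line_path_alt start length
  by_cases h : length ≤ 0
  · rw [straight_line_path, straight_line_path_alt,
        PySem.List.pyRange_one_eq_nil h, PySem.List.pyRange_one_eq_nil (by omega)]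
    simp
  · have : length = ((length.toNat : Nat) : Int) := by omega
    rw [this]; exact slp_key start length.toNat
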